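-- pv_equiv track=rewrite | github.com/ShravanthiV/machine-learning | finds.py | find_s_algorithm
-- ===== SOURCE A (Python) =====
-- def find_s_algorithm(examples):
--     hypothesis = None
--     for example in examples:
--         instance, label = example[:-1], example[-1]
--         if label == 'yes':
--             if hypothesis is None:
--                 hypothesis = list(instance)
--             else:
--
--                 for i in range(len(hypothesis)):
--                     if hypothesis[i] != instance[i]:
--                         hypothesis[i] = '?'
--     return hypothesis
-- ===== SOURCE B (Python) =====
-- def find_s_algorithm(examples):
--     positives = [ex[:-1] for ex in examples if ex[-1] == 'yes']
--     if not positives: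
--         return None
--     first = positives[0]
--     rest = positives[1:]
--     result = []
--     for i in range(len(first)):
--         v = first[i]
--         result.append(v if all(p[i] == v for p in rest) else '?')
--     return result
-- ===== Notes on version B (the rewrite author's own statement) =====
-- stated objective: alternative
-- what changed: A threads a mutable hypothesis through the examples, weakening it in place at each positive; B first collects the positive instances, then builds the hypothesis column by column (first positive's value if all later positives agree at that index, else '?').
import Mathlib
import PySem

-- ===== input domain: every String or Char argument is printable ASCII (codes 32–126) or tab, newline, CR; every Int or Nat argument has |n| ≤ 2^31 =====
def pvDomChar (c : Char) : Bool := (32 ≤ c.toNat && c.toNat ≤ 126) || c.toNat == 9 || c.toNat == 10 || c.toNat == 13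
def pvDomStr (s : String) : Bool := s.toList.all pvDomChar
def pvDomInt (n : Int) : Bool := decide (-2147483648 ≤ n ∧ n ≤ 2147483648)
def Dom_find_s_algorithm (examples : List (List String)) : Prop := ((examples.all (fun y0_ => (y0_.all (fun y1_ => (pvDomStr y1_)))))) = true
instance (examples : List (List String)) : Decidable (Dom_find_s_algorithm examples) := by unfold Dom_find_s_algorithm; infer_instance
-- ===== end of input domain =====

-- B rebuilds the Find-S hypothesis column by column from the collected positive instances
-- instead of A's in-place weakening of a running hypothesis; alternative decomposition, same cost.

-- ===== PORT A =====
-- literal port of A: fold the running hypothesis (Option) over the examples,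
-- weakening each disagreeing position to "?" via an indexed inner loop.
def find_s_algorithm (examples : List (List String)) : Option (List String) :=
  examples.foldl
    (fun hypothesis example_ =>
      let inst := PySem.List.slice example_ none (some (-1))        -- example[:-1]
      let label := PySem.List.pyGetD example_ (-1) ""               -- example[-1]; Pre_ excludes empty examples (IndexError)
      if label == "yes" then
        match hypothesis with
        | none => some inst
        | some h =>
          some ((PySem.List.pyRange 0 (h.length : Int) 1).foldl
            (fun h' i =>
              if PySem.List.pyGetD h' i "" != PySem.List.pyGetD inst i "" then
                PySem.List.pySetD h' i "?"                         -- hypothesis[i] = '?'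
              else h') h)
      else hypothesis)
    none

-- ===== PORT B =====
-- literal port of B: collect positive instances, then build the result left to right
-- (result.append(...) per column of the first positive instance).
def find_s_algorithm_alt (examples : List (List String)) : Option (List String) :=
  match (examples.filter (fun ex => PySem.List.pyGetD ex (-1) "" == "yes")).map
        (fun ex => PySem.List.slice ex none (some (-1))) with
  | [] => none
  | first :: rest =>
    some ((PySem.List.pyRange 0 (first.length : Int) 1).foldl
      (fun result i =>
        let v := PySem.List.pyGetD first i ""
        result ++ [if rest.all (fun p => PySem.List.pyGetD p i "" == v) then v else "?"])
      [])

-- ===== PRECONDITION & SPEC =====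
-- Pre_ excludes exactly the inputs where the Python A raises IndexError: an empty example
-- (example[-1]), or a positive example shorter than the first positive one (instance[i]).
def Pre_find_s_algorithm (examples : List (List String)) : Prop :=
  (∀ ex ∈ examples, ex ≠ []) ∧
  (∀ ex ∈ examples, PySem.List.pyGetD ex (-1) "" = "yes" →
    ((examples.find? (fun e => PySem.List.pyGetD e (-1) "" == "yes")).getD []).length ≤ ex.length)
instance (examples : List (List String)) : Decidable (Pre_find_s_algorithm examples) := by
  unfold Pre_find_s_algorithm; infer_instance

def pvWitness_find_s_algorithm : List (List String) :=
  [["big", "red", "yes"], ["big", "blue", "yes"], ["small", "red", "no"]]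

def Spec_find_s_algorithm (examples : List (List String)) (out : Option (List String)) : Prop := out = find_s_algorithm_alt examples
instance (examples : List (List String)) (out : Option (List String)) : Decidable (Spec_find_s_algorithm examples out) := by unfold Spec_find_s_algorithm; infer_instance

-- ===== CLAIM (what is proved, stated in full; the proofs are below) =====
def Claim_equal_find_s_algorithm : Prop := ∀ (examples : List (List String)), Dom_find_s_algorithm examples → Pre_find_s_algorithm examples → Spec_find_s_algorithm examples (find_s_algorithm examples)

-- ===== LEMMAS AND PROOFS =====

-- the column-wise hypothesis B computes, as a plain function of the positive instances
def pvCol (first : List String) (rest : List (List String)) : List String :=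
  (List.range first.length).map (fun j =>
    if rest.all (fun q => q.getD j "" == first.getD j "") then first.getD j "" else "?")

theorem pvCol_length (first : List String) (rest : List (List String)) :
    (pvCol first rest).length = first.length := by simp [pvCol]

theorem pvCol_nil (first : List String) : pvCol first [] = first := by
  apply List.ext_getElem
  · simp [pvCol]
  · intro i h1 h2
    simp [pvCol, List.getD_eq_getElem?_getD, List.getElem?_eq_getElem h2]

theorem pv_pySetD {α : Type} (xs : List α) (n : Nat) (v : α) (h : n < xs.length) :
    PySem.List.pySetD xs (n : Int) v = xs.set n v := by
  simp [PySem.List.pySetD, PySem.List.pySet?, PySem.List.pyIdx?, h]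

-- A's inner loop over range(len(h)) rewrites entry j to "?" where h and p disagree
theorem pv_inner_fold (p : List String) (n : Nat) (h : List String) (hn : n ≤ h.length) :
    (PySem.List.pyRange 0 (n : Int) 1).foldl
      (fun h' i =>
        if PySem.List.pyGetD h' i "" != PySem.List.pyGetD p i "" then
          PySem.List.pySetD h' i "?"
        else h') h
    = (List.range n).map (fun j => if h.getD j "" != p.getD j "" then "?" else h.getD j "")
      ++ h.drop n := by
  induction n with
  | zero => simp [PySem.List.pyRange]
  | succ n ih =>
    have hn' : n < h.length := hn
    have hcast : ((n + 1 : Nat) : Int) = (n : Int) + 1 := by push_cast; ring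
    rw [hcast, PySem.List.pyRange_one_succ_right (by positivity), List.foldl_append,
      ih (le_of_lt hn')]
    have hdrop : h.drop n = h.getD n "" :: h.drop (n + 1) := by
      rw [List.drop_eq_getElem_cons hn', List.getD_eq_getElem h "" hn']
    rw [hdrop, List.range_succ, List.map_append, List.map_singleton]
    set M := (List.range n).map (fun j => if h.getD j "" != p.getD j "" then "?" else h.getD j "")
      with hM
    have hMlen : M.length = n := by simp [hM]
    set e := h.getD n "" with he
    have hget : PySem.List.pyGetD (M ++ e :: h.drop (n + 1)) (n : Int) "" = e := by
      rw [PySem.List.pyGetD_natCast, List.getD_eq_getElem?_getD, ← hMlen,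
        List.getElem?_append_right (le_refl _)]
      simp
    have hlen : n < (M ++ e :: h.drop (n + 1)).length := by
      simp [hMlen]
    have hset : PySem.List.pySetD (M ++ e :: h.drop (n + 1)) (n : Int) "?"
        = M ++ "?" :: h.drop (n + 1) := by
      rw [pv_pySetD _ _ _ hlen, ← hMlen, List.set_append_right _ _ (le_refl _)]
      simp
    simp only [List.foldl_cons, List.foldl_nil, hget, PySem.List.pyGetD_natCast p n ""]
    by_cases hne : (e != p.getD n "") = true
    · rw [if_pos hne, hset, if_pos hne]
      simp
    · rw [if_neg hne, if_neg hne]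
      simp

-- weakening pvCol first rest against one more positive instance p gives pvCol first (rest ++ [p])
theorem pv_merge_col (first : List String) (rest : List (List String)) (p : List String) :
    (List.range (pvCol first rest).length).map
      (fun j => if (pvCol first rest).getD j "" != p.getD j "" then "?"
                else (pvCol first rest).getD j "")
    = pvCol first (rest ++ [p]) := by
  rw [pvCol_length]
  unfold pvCol
  apply List.map_congr_left
  intro j hj
  simp only [List.mem_range] at hj
  rw [PySem.List.getD_map_range _ _ _ _ hj]
  by_cases hall : rest.all (fun q => q.getD j "" == first.getD j "")
  · simp only [hall, if_true, List.all_append, List.all_cons, List.all_nil, Bool.and_true]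
    by_cases heq : first.getD j "" = p.getD j ""
    · rw [heq, bne_self_eq_false]
      simp
    · have hb : (p.getD j "" == first.getD j "") = false := beq_eq_false_iff_ne.mpr (Ne.symm heq)
      rw [hb, if_pos (bne_iff_ne.mpr heq)]
      simp
  · have hall' : (rest.all fun q => q.getD j "" == first.getD j "") = false := by
      simpa using hall
    rw [List.all_append, hall', Bool.false_and]
    simp only [Bool.false_eq_true, if_false]
    split <;> rfl

-- the positive instances of a list of examples
def pvPos (exs : List (List String)) : List (List String) :=
  (exs.filter (fun ex => PySem.List.pyGetD ex (-1) "" == "yes")).map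
    (fun ex => PySem.List.slice ex none (some (-1)))

theorem pvPos_cons_pos {ex : List String} (exs : List (List String))
    (h : (PySem.List.pyGetD ex (-1) "" == "yes") = true) :
    pvPos (ex :: exs) = PySem.List.slice ex none (some (-1)) :: pvPos exs := by
  simp only [pvPos, List.filter_cons]
  rw [if_pos h]
  rfl

theorem pvPos_cons_neg {ex : List String} (exs : List (List String))
    (h : ¬ (PySem.List.pyGetD ex (-1) "" == "yes") = true) :
    pvPos (ex :: exs) = pvPos exs := by
  simp only [pvPos, List.filter_cons]
  rw [if_neg h]

-- A's loop body, written without lets (definitionally equal to the port's lambda)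
def pvStep (hypothesis : Option (List String)) (example_ : List String) : Option (List String) :=
  if PySem.List.pyGetD example_ (-1) "" == "yes" then
    match hypothesis with
    | none => some (PySem.List.slice example_ none (some (-1)))
    | some h =>
      some ((PySem.List.pyRange 0 (h.length : Int) 1).foldl
        (fun h' i =>
          if PySem.List.pyGetD h' i ""
              != PySem.List.pyGetD (PySem.List.slice example_ none (some (-1))) i "" then
            PySem.List.pySetD h' i "?"
          else h') h)
  else hypothesis

theorem pvA_eq (examples : List (List String)) :
    find_s_algorithm examples = examples.foldl pvStep none := rfl

-- B's appending fold over range(len(first)) is exactly pvCol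
theorem pv_alt_body (first : List String) (rest : List (List String)) :
    (PySem.List.pyRange 0 (first.length : Int) 1).foldl
      (fun result i =>
        result ++ [if rest.all (fun p => PySem.List.pyGetD p i "" == PySem.List.pyGetD first i "")
                   then PySem.List.pyGetD first i "" else "?"])
      []
    = pvCol first rest := by
  rw [PySem.List.foldl_append_singleton_eq_map, PySem.List.pyRange_zero_natCast, List.map_map]
  simp [pvCol, Function.comp_def]

theorem pv_alt_char (examples : List (List String)) :
    find_s_algorithm_alt examples
      = match pvPos examples with
        | [] => none
        | first :: rest => some (pvCol first rest) := by
  unfold find_s_algorithm_alt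
  simp only [pvPos]
  cases hM : (examples.filter (fun ex => PySem.List.pyGetD ex (-1) "" == "yes")).map
      (fun ex => PySem.List.slice ex none (some (-1))) with
  | nil => rfl
  | cons first rest => exact congrArg some (pv_alt_body first rest)

-- A's outer fold, once a hypothesis exists, keeps it equal to pvCol of the positives seen
theorem pv_main_fold (exs : List (List String)) :
    ∀ (first : List String) (rest : List (List String)),
    exs.foldl pvStep (some (pvCol first rest)) = some (pvCol first (rest ++ pvPos exs)) := by
  induction exs with
  | nil => intro first rest; simp [pvPos]
  | cons ex exs ih =>
    intro first rest
    rw [List.foldl_cons]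
    by_cases hpos : (PySem.List.pyGetD ex (-1) "" == "yes") = true
    · have hstep : pvStep (some (pvCol first rest)) ex
          = some (pvCol first (rest ++ [PySem.List.slice ex none (some (-1))])) := by
        unfold pvStep
        rw [if_pos hpos]
        rw [show (match (some (pvCol first rest) : Option (List String)) with
              | none => some (PySem.List.slice ex none (some (-1)))
              | some h =>
                some ((PySem.List.pyRange 0 (h.length : Int) 1).foldl
                  (fun h' i =>
                    if PySem.List.pyGetD h' i ""
                        != PySem.List.pyGetD (PySem.List.slice ex none (some (-1))) i "" then
                      PySem.List.pySetD h' i "?"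
                    else h') h))
            = some ((PySem.List.pyRange 0 ((pvCol first rest).length : Int) 1).foldl
                (fun h' i =>
                  if PySem.List.pyGetD h' i ""
                      != PySem.List.pyGetD (PySem.List.slice ex none (some (-1))) i "" then
                    PySem.List.pySetD h' i "?"
                  else h') (pvCol first rest)) from rfl]
        rw [pv_inner_fold _ _ _ (le_refl _), List.drop_length, List.append_nil, pv_merge_col]
      rw [hstep, ih, pvPos_cons_pos exs hpos, List.append_assoc]
      rfl
    · have hstep : pvStep (some (pvCol first rest)) ex = some (pvCol first rest) := by
        unfold pvStep
        rw [if_neg hpos]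
      rw [hstep, ih, pvPos_cons_neg exs hpos]

theorem pv_equal (examples : List (List String)) :
    find_s_algorithm examples = find_s_algorithm_alt examples := by
  rw [pvA_eq examples, pv_alt_char examples]
  induction examples with
  | nil => rfl
  | cons ex exs ih =>
    rw [List.foldl_cons]
    by_cases hpos : (PySem.List.pyGetD ex (-1) "" == "yes") = true
    · have hstep : pvStep none ex = some (PySem.List.slice ex none (some (-1))) := by
        unfold pvStep
        rw [if_pos hpos]
      rw [hstep,
        show (some (PySem.List.slice ex none (some (-1))))
            = some (pvCol (PySem.List.slice ex none (some (-1))) []) by rw [pvCol_nil],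
        pv_main_fold, pvPos_cons_pos exs hpos, List.nil_append]
    · have hstep : pvStep none ex = none := by
        unfold pvStep
        rw [if_neg hpos]
      rw [hstep, pvPos_cons_neg exs hpos]
      exact ih
-- ===== VERDICT (by name: the statement is the Claim_ definition above) =====
theorem find_s_algorithm_spec : Claim_equal_find_s_algorithm := by
  intro examples _ _
  unfold Spec_find_s_algorithm
  exact pv_equal examples
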